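-- pv_equiv track=rewrite | github.com/uphria/ESC190 | Project 1/test2.py | binary_search_deluxe_right
-- ===== SOURCE A (Python) =====
-- def binary_search_deluxe_right(L, target):
--     left = 0
--     right = len(L) - 1
--     while left <= right:
--         mid = (left + right) // 2
--         if L[mid][0:len(target)] <= target:
--             left = mid + 1
--         else:
--             right = mid - 1
--     return right
-- ===== SOURCE B (Python) =====
-- def binary_search_deluxe_right(L, target):
--     # Recursive divide-and-conquer formulation of the same binary search.
--     def rec(left, right):
--         if left > right:
--             return right
--         mid = (left + right) // 2
--         if L[mid][0:len(target)] <= target: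
--             return rec(mid + 1, right)
--         else:
--             return rec(left, mid - 1)
--     return rec(0, len(L) - 1)
-- ===== Notes on version B (the rewrite author's own statement) =====
-- stated objective: alternative
-- what changed: The iterative while-loop with mutable left/right state is recast as a recursive divide-and-conquer helper rec(left, right) that returns the answer directly from its base case instead of threading loop state.
import Mathlib
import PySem

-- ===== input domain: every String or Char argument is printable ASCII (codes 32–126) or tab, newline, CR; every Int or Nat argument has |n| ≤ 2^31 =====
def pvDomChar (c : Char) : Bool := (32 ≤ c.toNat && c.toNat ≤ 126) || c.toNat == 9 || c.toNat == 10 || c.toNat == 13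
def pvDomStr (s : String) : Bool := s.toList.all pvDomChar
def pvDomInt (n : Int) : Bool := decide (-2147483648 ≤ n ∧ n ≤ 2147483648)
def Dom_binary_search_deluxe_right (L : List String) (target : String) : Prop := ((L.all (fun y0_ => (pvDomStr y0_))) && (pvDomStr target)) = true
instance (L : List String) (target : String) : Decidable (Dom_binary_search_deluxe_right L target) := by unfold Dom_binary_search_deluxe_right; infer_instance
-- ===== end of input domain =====

-- B recasts A's iterative while-loop as a recursive divide-and-conquer helper (same probes, different decomposition); objective: alternative.

-- ===== PORT A =====
-- A's while-loop over the mutable state (left, right); fuel bounds the iterations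
-- (the interval shrinks every step, so L.length fuel is always enough — proved below).
-- The `none` branch of pyGet? (Python IndexError) is unreachable from the initial state.
def bsdrLoop (L : List String) (target : String) : Nat → Int × Int → Int × Int
  | 0, st => st
  | fuel+1, (left, right) =>
    if left ≤ right then
      let mid := PySem.Int.floordiv (left + right) 2
      match PySem.List.pyGet? L mid with
      | some s =>
        if PySem.Str.slice s (some 0) (some (PySem.Str.len target : Int)) ≤ target then
          bsdrLoop L target fuel (mid + 1, right)
        else
          bsdrLoop L target fuel (left, mid - 1)
      | none => (left, right)
    else (left, right)

def binary_search_deluxe_right (L : List String) (target : String) : Int :=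
  (bsdrLoop L target L.length (0, (L.length : Int) - 1)).2

-- ===== PORT B =====
-- Source B's recursive helper rec(left, right)
def bsdrRec (L : List String) (target : String) (left right : Int) : Int :=
  if left > right then right
  else
    match PySem.List.pyGet? L (PySem.Int.floordiv (left + right) 2) with
    | some s =>
      if PySem.Str.slice s (some 0) (some (PySem.Str.len target : Int)) ≤ target then
        bsdrRec L target (PySem.Int.floordiv (left + right) 2 + 1) right
      else
        bsdrRec L target left (PySem.Int.floordiv (left + right) 2 - 1)
    | none => right
  termination_by (right + 1 - left).toNat
  decreasing_by
    · have hb := PySem.Int.floordiv_two_mid_bounds (show left ≤ right by omega)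
      omega
    · have hb := PySem.Int.floordiv_two_mid_bounds (show left ≤ right by omega)
      omega

def binary_search_deluxe_right_alt (L : List String) (target : String) : Int :=
  bsdrRec L target 0 ((L.length : Int) - 1)

-- ===== PRECONDITION & SPEC =====
def Spec_binary_search_deluxe_right (L : List String) (target : String) (out : Int) : Prop := out = binary_search_deluxe_right_alt L target
instance (L : List String) (target : String) (out : Int) : Decidable (Spec_binary_search_deluxe_right L target out) := by unfold Spec_binary_search_deluxe_right; infer_instance

-- ===== CLAIM (what is proved, stated in full; the proofs are below) =====
def Claim_equal_binary_search_deluxe_right : Prop := ∀ (L : List String) (target : String), Dom_binary_search_deluxe_right L target → Spec_binary_search_deluxe_right L target (binary_search_deluxe_right L target)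

-- ===== LEMMAS AND PROOFS =====
lemma bsdrLoop_eq_rec (L : List String) (target : String) :
    ∀ (fuel : Nat) (l r : Int), (r + 1 - l).toNat ≤ fuel →
      (bsdrLoop L target fuel (l, r)).2 = bsdrRec L target l r := by
  intro fuel
  induction fuel with
  | zero =>
    intro l r h
    have hlr : r < l := by omega
    rw [bsdrRec]
    simp [bsdrLoop, hlr]
  | succ n ih =>
    intro l r h
    rw [bsdrRec]
    by_cases hlr : l ≤ r
    · have hb := PySem.Int.floordiv_two_mid_bounds hlr
      simp only [bsdrLoop, if_pos hlr, gt_iff_lt, if_neg (by omega : ¬ r < l)]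
      cases hget : PySem.List.pyGet? L (PySem.Int.floordiv (l + r) 2) with
      | none => simp
      | some s =>
        by_cases hc : PySem.Str.slice s (some 0) (some (PySem.Str.len target : Int)) ≤ target
        · simp only [if_pos hc]
          exact ih _ _ (by omega)
        · simp only [if_neg hc]
          exact ih _ _ (by omega)
    · simp [bsdrLoop, hlr, show l > r by omega]

-- ===== VERDICT (by name: the statement is the Claim_ definition above) =====
theorem binary_search_deluxe_right_spec : Claim_equal_binary_search_deluxe_right := by
  intro L target _
  unfold Spec_binary_search_deluxe_right binary_search_deluxe_right binary_search_deluxe_right_alt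
  exact bsdrLoop_eq_rec L target L.length 0 ((L.length : Int) - 1) (by omega)
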